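-- pv_equiv track=rewrite | github.com/Raul1963/grundlagen-der-programmierung | Seminar/S6/ui/console.py | hide_word
-- ===== SOURCE A (Python) =====
-- def hide_word(word, guesses):
--     new_word=''
--     for idx in range(len(word)):
--         if idx in guesses:
--             new_word+=word[idx]
--         else:
--             new_word+='_'
--     return new_word
-- ===== SOURCE B (Python) =====
-- def hide_word(word, guesses):
--     result = ['_'] * len(word)
--     for idx in guesses:
--         if 0 <= idx < len(word):
--             result[idx] = word[idx]
--     return ''.join(result)
-- ===== Notes on version B (the rewrite author's own statement) =====
-- stated objective: faster
-- what changed: B pre-fills an underscore buffer and iterates over the guesses patching revealed positions, instead of scanning every position and testing list membership of each index in the guess list.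
import Mathlib
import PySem

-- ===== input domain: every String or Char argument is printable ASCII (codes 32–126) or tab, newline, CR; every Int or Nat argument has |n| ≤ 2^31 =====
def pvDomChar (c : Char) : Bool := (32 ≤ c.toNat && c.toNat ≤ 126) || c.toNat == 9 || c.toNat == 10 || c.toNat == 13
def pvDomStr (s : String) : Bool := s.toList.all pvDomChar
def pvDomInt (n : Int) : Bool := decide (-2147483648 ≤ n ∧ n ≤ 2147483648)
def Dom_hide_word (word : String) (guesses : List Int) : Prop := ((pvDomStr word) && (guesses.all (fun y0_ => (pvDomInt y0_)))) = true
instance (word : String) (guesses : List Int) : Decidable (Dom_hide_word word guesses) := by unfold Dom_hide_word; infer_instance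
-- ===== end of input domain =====

-- B patches a pre-filled underscore buffer by iterating over the guesses, instead of scanning every position and testing membership in the guess list.

-- ===== PORT A =====
def hide_word (word : String) (guesses : List Int) : String :=
  String.ofList ((PySem.List.pyRange 0 word.toList.length 1).foldl
    (fun nw idx =>
      if idx ∈ guesses then nw ++ [PySem.List.pyGetD word.toList idx '_']
      else nw ++ ['_']) [])

-- ===== PORT B =====
def hide_word_alt (word : String) (guesses : List Int) : String :=
  String.ofList (guesses.foldl
    (fun buf idx =>
      if 0 ≤ idx ∧ idx < (word.toList.length : Int) then buf.set idx.toNat (PySem.List.pyGetD word.toList idx '_')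
      else buf)
    (List.replicate word.toList.length '_'))

-- ===== PRECONDITION & SPEC =====
def Spec_hide_word (word : String) (guesses : List Int) (out : String) : Prop := out = hide_word_alt word guesses
instance (word : String) (guesses : List Int) (out : String) : Decidable (Spec_hide_word word guesses out) := by unfold Spec_hide_word; infer_instance

-- ===== CLAIM (what is proved, stated in full; the proofs are below) =====
def Claim_equal_hide_word : Prop := ∀ (word : String) (guesses : List Int), Dom_hide_word word guesses → Spec_hide_word word guesses (hide_word word guesses)

-- ===== LEMMAS AND PROOFS =====

-- A's loop appends one character per position: it is init ++ map of a per-position choice.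
theorem afold_eq_map (cs : List Char) (gs : List Int) :
    ∀ (l : List Int) (init : List Char),
      l.foldl (fun nw idx =>
        if idx ∈ gs then nw ++ [PySem.List.pyGetD cs idx '_'] else nw ++ ['_']) init
      = init ++ l.map (fun idx => if idx ∈ gs then PySem.List.pyGetD cs idx '_' else '_') := by
  intro l
  induction l with
  | nil => intro init; simp
  | cons x xs ih =>
      intro init
      simp only [List.foldl_cons, List.map_cons]
      by_cases hx : x ∈ gs <;> simp [hx, ih]

-- B's loop: final buffer entry i is cs[i] if i was guessed (and in range), else the old entry.
theorem bfold_getElem? (cs : List Char) :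
    ∀ (gs : List Int) (buf : List Char), buf.length = cs.length → ∀ (i : Nat),
      (gs.foldl (fun buf idx =>
          if 0 ≤ idx ∧ idx < (cs.length : Int) then buf.set idx.toNat (PySem.List.pyGetD cs idx '_')
          else buf) buf)[i]?
      = if (i : Int) ∈ gs ∧ i < cs.length then cs[i]? else buf[i]? := by
  intro gs
  induction gs with
  | nil => intro buf hlen i; simp
  | cons g gs ih =>
      intro buf hlen i
      have hstep : (if 0 ≤ g ∧ g < (cs.length : Int) then buf.set g.toNat (PySem.List.pyGetD cs g '_') else buf).length = cs.length := by
        split <;> simp [hlen]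
      rw [List.foldl_cons, ih _ hstep]
      by_cases hmem : (i : Int) ∈ gs ∧ i < cs.length
      · rw [if_pos hmem, if_pos ⟨List.mem_cons.mpr (Or.inr hmem.1), hmem.2⟩]
      · rw [if_neg hmem]
        by_cases hg : (i : Int) = g ∧ i < cs.length
        · obtain ⟨hgi, hilen⟩ := hg
          have hrange : 0 ≤ g ∧ g < (cs.length : Int) := by
            constructor <;> omega
          rw [if_pos hrange, if_pos ⟨List.mem_cons.mpr (Or.inl hgi), hilen⟩]
          have htn : g.toNat = i := by omega
          have hv : PySem.List.pyGetD cs g '_' = cs[g.toNat] := by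
            have hge : g = ((g.toNat : Nat) : Int) := by omega
            conv_lhs => rw [hge]
            rw [PySem.List.pyGetD_natCast]
            simp [List.getD_eq_getElem?_getD, List.getElem?_eq_getElem (show g.toNat < cs.length by omega)]
          rw [hv]
          subst htn
          rw [List.getElem?_set_self (by omega)]
          exact (List.getElem?_eq_getElem (by omega)).symm
        · have hcond : ¬ (((i : Int) ∈ g :: gs) ∧ i < cs.length) := by
            intro ⟨hin, hlt⟩
            rcases List.mem_cons.mp hin with h | h
            · exact hg ⟨h, hlt⟩
            · exact hmem ⟨h, hlt⟩
          rw [if_neg hcond]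
          split
          · next hr =>
              rw [List.getElem?_set_ne]
              intro he
              exact hg ⟨by omega, by omega⟩
          · rfl

theorem hide_word_spec_aux (word : String) (guesses : List Int) :
    hide_word word guesses = hide_word_alt word guesses := by
  unfold hide_word hide_word_alt
  congr 1
  set cs := word.toList with hcs
  rw [afold_eq_map cs guesses, List.nil_append]
  apply List.ext_getElem?
  intro i
  rw [bfold_getElem? cs guesses _ (by simp)]
  by_cases hi : i < cs.length
  · rw [PySem.List.getElem?_map_pyRange_zero _ _ _ hi]
    by_cases hmem : (i : Int) ∈ guesses
    · rw [if_pos (show (i : Int) ∈ guesses ∧ i < cs.length from ⟨hmem, hi⟩),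
          List.getElem?_eq_getElem hi]
      simp [hmem, List.getD_eq_getElem?_getD, List.getElem?_eq_getElem hi]
    · rw [if_neg hmem, if_neg (by tauto)]
      simp [hi]
  · rw [List.getElem?_eq_none (by simp [PySem.List.length_pyRange_one]; omega),
        if_neg (by tauto), List.getElem?_eq_none (by simp; omega)]

-- ===== VERDICT (by name: the statement is the Claim_ definition above) =====
theorem hide_word_spec : Claim_equal_hide_word := by
  intro word guesses _
  exact hide_word_spec_aux word guesses
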